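-- pv_equiv track=rewrite | github.com/ssebastianj/tap-2016 | tap/problemae/solucion.py | puede_hallar_secuencia
-- ===== SOURCE A (Python) =====
-- def puede_hallar_secuencia(transiciones):
--     app_objetivo = 1
--     resto_aplicaciones = set(range(1, len(transiciones) + 1))
--     resto_aplicaciones.remove(app_objetivo)
--
--     trans_from_obj = set(transiciones[app_objetivo - 1])
--     can_make_minimum_steps = not (resto_aplicaciones ^ trans_from_obj)
--     can_make_first_steps = (
--         can_make_minimum_steps or app_objetivo in trans_from_obj
--     )
--
--     resto_transiciones = list(transiciones)
--     del resto_transiciones[app_objetivo - 1]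
--
--     columnas = (set(col) for col in zip(*resto_transiciones))
--
--     can_make_last_steps = any(
--         len(col) == 1 and col.pop() == app_objetivo
--         for col in columnas
--     )
--
--     there_is_a_seq = can_make_first_steps and can_make_last_steps
--
--     return 'S' if there_is_a_seq else 'N'
-- ===== SOURCE B (Python) =====
-- def puede_hallar_secuencia(transiciones):
--     n = len(transiciones)
--     primera = transiciones[0]
--     ok_first = 1 in primera or (
--         len(set(primera)) == n - 1 and all(2 <= x <= n for x in primera)
--     )
--     cands = None
--     for fila in transiciones[1:]:
--         ones = {j for j, x in enumerate(fila) if x == 1}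
--         cands = ones if cands is None else cands & ones
--         if not cands:
--             break
--     return 'S' if ok_first and cands else 'N'
-- ===== Notes on version B (the rewrite author's own statement) =====
-- stated objective: alternative
-- what changed: First-steps becomes a distinct-count-plus-bounds test (len(set(primera)) == n-1 and all elements in [2,n]) instead of set equality via symmetric difference, and last-steps is a single forward pass over the remaining rows that maintains a shrinking set of candidate column indices (positions holding 1), intersecting it row by row with early exit, instead of A's zip-transpose into per-column sets. The candidate set shrinks and the loop exits early once it is empty, avoiding A's full transpose and per-column set construction (measured constant-factor speedup).
import Mathlib
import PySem

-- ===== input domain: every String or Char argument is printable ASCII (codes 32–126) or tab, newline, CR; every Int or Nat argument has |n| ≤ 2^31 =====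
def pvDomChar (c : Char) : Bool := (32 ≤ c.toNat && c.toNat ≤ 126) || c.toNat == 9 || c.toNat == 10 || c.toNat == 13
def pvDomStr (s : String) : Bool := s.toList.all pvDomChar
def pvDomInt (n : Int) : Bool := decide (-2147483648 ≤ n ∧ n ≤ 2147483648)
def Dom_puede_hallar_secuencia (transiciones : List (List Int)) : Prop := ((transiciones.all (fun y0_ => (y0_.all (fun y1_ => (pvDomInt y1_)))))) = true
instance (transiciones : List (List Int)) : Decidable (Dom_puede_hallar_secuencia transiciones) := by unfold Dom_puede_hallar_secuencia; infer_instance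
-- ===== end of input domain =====

-- B replaces A's set machinery: first-steps by a distinct-count-plus-bounds test, last-steps
-- by one forward pass intersecting a shrinking candidate-column-index set with early exit;
-- same return value on every nonempty input (A raises KeyError, B IndexError on []).

-- ===== PORT A =====

-- zip(*rows) for rows = r :: rs: structural recursion on the first row, truncating at the
-- shortest row, exactly Python's zip.
def pvZipAux (r : List Int) (rs : List (List Int)) : List (List Int) :=
  match r with
  | [] => []
  | x :: r' =>
    if rs.all (fun s => !s.isEmpty)
    then (x :: rs.map (fun s => s.headD 0)) :: pvZipAux r' (rs.map List.tail)
    else []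

def pvZipStar (rows : List (List Int)) : List (List Int) :=
  match rows with
  | [] => []
  | r :: rs => pvZipAux r rs

def puede_hallar_secuencia (transiciones : List (List Int)) : String :=
  -- app_objetivo = 1; resto_aplicaciones = set(range(1, len+1)); .remove(1)  (KeyError on [])
  match PySem.Set.remove? (PySem.Set.ofList (PySem.List.pyRange 1 ((transiciones.length : Int) + 1))) 1 with
  | none => ""  -- KeyError on empty input; excluded by Pre_
  | some resto_aplicaciones =>
    match PySem.List.pyGet? transiciones 0, PySem.List.pop? transiciones 0 with
    | some fila, some (_, resto_transiciones) =>
      let trans_from_obj := PySem.Set.ofList fila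
      let can_make_minimum_steps := decide (PySem.Set.symmDiff resto_aplicaciones trans_from_obj = [])
      let can_make_first_steps := can_make_minimum_steps || trans_from_obj.contains 1
      let can_make_last_steps := (pvZipStar resto_transiciones).any (fun col =>
        let c := PySem.Set.ofList col
        decide (PySem.Set.len c = 1) && ((c.headD 0) == 1))
      if can_make_first_steps && can_make_last_steps then "S" else "N"
    | _, _ => ""  -- unreachable: remove? succeeded, so the list is nonempty

-- ===== PORT B =====

-- {j for j, x in enumerate(fila) if x == 1}
def pvOnes (fila : List Int) : PySem.Set Int :=
  PySem.Set.ofList (((PySem.List.enumerate fila 0).filter (fun p => p.2 == 1)).map (·.1))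

-- the B loop: cands starts as None, intersected with each row's ones-set, early break when empty
def pvCandLoop (rows : List (List Int)) (cands : Option (PySem.Set Int)) : Option (PySem.Set Int) :=
  match rows with
  | [] => cands
  | fila :: rest =>
    let ones := pvOnes fila
    let c := match cands with
      | none => ones
      | some s => PySem.Set.inter s ones
    if c.isEmpty then some c else pvCandLoop rest (some c)

def puede_hallar_secuencia_alt (transiciones : List (List Int)) : String :=
  match PySem.List.pyGet? transiciones 0 with
  | none => ""  -- IndexError on empty input; excluded by Pre_
  | some primera =>
    let n : Int := (transiciones.length : Int)
    let okFirst := primera.contains 1 ||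
      (decide ((PySem.Set.len (PySem.Set.ofList primera) : Int) = n - 1) &&
       primera.all (fun x => decide (2 ≤ x) && decide (x ≤ n)))
    let cands := pvCandLoop (PySem.List.slice transiciones (some 1) none) none
    -- 'ok_first and cands': None and the empty set are both falsy
    let okLast := match cands with
      | none => false
      | some c => !c.isEmpty
    if okFirst && okLast then "S" else "N"

-- ===== PRECONDITION & SPEC =====
-- Pre_ excludes only the empty list, on which A raises KeyError (and B raises IndexError).
def Pre_puede_hallar_secuencia (transiciones : List (List Int)) : Prop := transiciones ≠ []
instance (transiciones : List (List Int)) : Decidable (Pre_puede_hallar_secuencia transiciones) := by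
  unfold Pre_puede_hallar_secuencia; infer_instance

def pvWitness_puede_hallar_secuencia : List (List Int) := [[2, 3], [1], [1, 1]]

def Spec_puede_hallar_secuencia (transiciones : List (List Int)) (out : String) : Prop := out = puede_hallar_secuencia_alt transiciones
instance (transiciones : List (List Int)) (out : String) : Decidable (Spec_puede_hallar_secuencia transiciones out) := by unfold Spec_puede_hallar_secuencia; infer_instance

-- ===== CLAIM (what is proved, stated in full; the proofs are below) =====
def Claim_equal_puede_hallar_secuencia : Prop := ∀ (transiciones : List (List Int)), Dom_puede_hallar_secuencia transiciones → Pre_puede_hallar_secuencia transiciones → Spec_puede_hallar_secuencia transiciones (puede_hallar_secuencia transiciones)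

-- ===== LEMMAS AND PROOFS =====

-- `any` and `all` respect pointwise agreement on members.
lemma pv_any_congr {α : Type} {l : List α} {f g : α → Bool}
    (h : ∀ a ∈ l, f a = g a) : l.any f = l.any g := by
  induction l with
  | nil => rfl
  | cons a l ih =>
    simp only [List.any_cons, h a (List.mem_cons_self),
      ih fun b hb => h b (List.mem_cons_of_mem a hb)]

lemma pv_all_congr {α : Type} {l : List α} {f g : α → Bool}
    (h : ∀ a ∈ l, f a = g a) : l.all f = l.all g := by
  induction l with
  | nil => rfl
  | cons a l ih =>
    simp only [List.all_cons, h a (List.mem_cons_self),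
      ih fun b hb => h b (List.mem_cons_of_mem a hb)]

-- Growing a set by folding `add` never shrinks it.
lemma pv_len_le_foldl_add (xs : List Int) (s : PySem.Set Int) :
    s.length ≤ (xs.foldl PySem.Set.add s).length := by
  induction xs generalizing s with
  | nil => simp
  | cons x xs ih =>
    simp only [List.foldl_cons]
    refine le_trans ?_ (ih (PySem.Set.add s x))
    simp [PySem.Set.add]; split <;> simp

-- The head of the accumulator is preserved by folding `add` over a nonempty accumulator.
lemma pv_headD_foldl_add (xs : List Int) (s : PySem.Set Int) (hs : s ≠ []) :
    (xs.foldl PySem.Set.add s).headD 0 = s.headD 0 := by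
  induction xs generalizing s with
  | nil => rfl
  | cons x xs ih =>
    simp only [List.foldl_cons]
    rw [ih]
    · simp only [PySem.Set.add]; split
      · rfl
      · cases s with
        | nil => exact absurd rfl hs
        | cons a t => rfl
    · simp only [PySem.Set.add]; split
      · exact hs
      · simp

-- Folding `add` keeps the length exactly when every element is already present.
lemma pv_len_foldl_add_eq_iff (xs : List Int) (s : PySem.Set Int) :
    (xs.foldl PySem.Set.add s).length = s.length ↔ ∀ y ∈ xs, y ∈ s := by
  induction xs generalizing s with
  | nil => simp
  | cons x xs ih =>
    simp only [List.foldl_cons, List.mem_cons]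
    by_cases hx : x ∈ s
    · rw [show PySem.Set.add s x = s from by
        simp [PySem.Set.add, PySem.Set.contains, hx]]
      rw [ih]
      constructor
      · intro h y hy
        rcases hy with rfl | hy
        · exact hx
        · exact h y hy
      · intro h y hy; exact h y (Or.inr hy)
    · have hadd : PySem.Set.add s x = s ++ [x] := by
        simp [PySem.Set.add, PySem.Set.contains, hx]
      rw [hadd]
      constructor
      · intro h
        have := pv_len_le_foldl_add xs (s ++ [x])
        simp at this
        omega
      · intro h
        exact absurd (h x (Or.inl rfl)) hx

-- A's per-column set test on a nonempty column = "every entry is 1".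
lemma pv_col_test (x : Int) (xs : List Int) :
    (decide (PySem.Set.len (PySem.Set.ofList (x :: xs)) = 1) &&
      ((PySem.Set.ofList (x :: xs)).headD 0 == 1))
    = ((x == 1) && xs.all (fun y => y == 1)) := by
  have hof : PySem.Set.ofList (x :: xs) = xs.foldl PySem.Set.add [x] := by
    simp [PySem.Set.ofList, PySem.Set.empty, PySem.Set.add, PySem.Set.contains]
  have hhead : (PySem.Set.ofList (x :: xs)).headD 0 = x := by
    rw [hof, pv_headD_foldl_add xs [x] (by simp)]; rfl
  have hlen : (PySem.Set.ofList (x :: xs)).length = 1 ↔ ∀ y ∈ xs, y = x := by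
    rw [hof, show (1 : Nat) = ([x] : List Int).length from rfl, pv_len_foldl_add_eq_iff]
    simp
  rw [hhead]
  rcases Decidable.em (x = 1) with rfl | hx
  · simp only [beq_self_eq_true, Bool.true_and, Bool.and_true]
    rw [Bool.eq_iff_iff]
    simp [hlen, List.all_eq_true]
  · have hb : (x == 1) = false := beq_eq_false_iff_ne.mpr hx
    simp [hb]

-- Characterisation of A's zip-any as an index scan over the first row.
lemma pv_zip_any (P : List Int → Bool) (r : List Int) (rs : List (List Int)) :
    (pvZipAux r rs).any P
    = (List.range r.length).any (fun j =>
        rs.all (fun s => decide (j < s.length)) &&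
        P (r.getD j 0 :: rs.map (fun s => s.getD j 0))) := by
  induction r generalizing rs with
  | nil => simp [pvZipAux]
  | cons x r' ih =>
    by_cases hne : rs.all (fun s => !s.isEmpty) = true
    · have hnil : ∀ s ∈ rs, s ≠ [] := by
        intro s hs
        have := List.all_eq_true.mp hne s hs
        simpa using this
      simp only [pvZipAux, hne, if_true, List.any_cons, List.length_cons,
        List.range_succ_eq_map, List.any_map, ih]
      congr 1
      · -- column 0
        have h0 : rs.all (fun s => decide (0 < s.length)) = true := by
          rw [List.all_eq_true]
          intro s hs
          simpa [List.length_pos_iff] using hnil s hs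
        simp only [h0, Bool.true_and, List.getD_cons_zero]
        congr 2
        apply List.map_congr_left
        intro s _
        cases s <;> rfl
      · -- columns 1..
        apply pv_any_congr
        intro j hj
        have hall : (rs.map List.tail).all (fun s => decide (j < s.length))
            = rs.all (fun s => decide (j + 1 < s.length)) := by
          rw [List.all_map]
          apply pv_all_congr
          intro s hs
          have hsne := hnil s hs
          cases s with
          | nil => exact absurd rfl hsne
          | cons a t => simp
        have hmap : (rs.map List.tail).map (fun s => s.getD j 0)
            = rs.map (fun s => s.getD (j + 1) 0) := by
          rw [List.map_map]
          apply List.map_congr_left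
          intro s hs
          have hsne := hnil s hs
          cases s with
          | nil => exact absurd rfl hsne
          | cons a t => rfl
        rw [hall, hmap]
        rfl
    · have hB : (rs.all fun s => !s.isEmpty) = false := by simpa using hne
      have hfail : ∀ (j : Nat), rs.all (fun s => decide (j < s.length)) = false := by
        intro j
        rw [List.all_eq_false]
        rcases List.all_eq_false.mp hB with ⟨s, hs, hse⟩
        refine ⟨s, hs, ?_⟩
        have : s = [] := by simpa using hse
        simp [this]
      rw [show pvZipAux (x :: r') rs = [] from by simp [pvZipAux, hB]]
      rw [List.any_nil, eq_comm, List.any_eq_false]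
      intro j hj
      simp [hfail j]

-- The symmetric difference of two Python sets is empty iff they have the same members.
lemma pv_symmDiff_nil_iff (s t : PySem.Set Int) :
    PySem.Set.symmDiff s t = [] ↔ ∀ x, x ∈ s ↔ x ∈ t := by
  simp only [PySem.Set.symmDiff, PySem.Set.diff, PySem.Set.contains,
    List.append_eq_nil_iff, List.filter_eq_nil_iff]
  constructor
  · rintro ⟨h1, h2⟩ x
    constructor
    · intro hx
      have := h1 x hx
      simpa [List.contains_eq_mem] using this
    · intro hx
      have := h2 x hx
      simpa [List.contains_eq_mem] using this
  · intro h
    constructor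
    · intro x hx
      simp [List.contains_eq_mem, (h x).mp hx]
    · intro x hx
      simp [List.contains_eq_mem, (h x).mpr hx]

-- Membership in A's remaining-applications set.
lemma pv_mem_discard_range (n x : Int) :
    x ∈ PySem.Set.discard (PySem.Set.ofList (PySem.List.pyRange 1 (n + 1))) 1
      ↔ 2 ≤ x ∧ x ≤ n := by
  simp [PySem.Set.discard, List.mem_filter, PySem.Set.mem_ofList,
    PySem.List.mem_pyRange_one]
  omega

-- For a duplicate-free list, "members are exactly {2..n}" = "n-1 distinct members, all in [2,n]".
lemma pv_nodup_card_iff (S : List Int) (hS : S.Nodup) (n0 : Nat) (hn : 1 ≤ n0) :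
    (∀ x, x ∈ S ↔ 2 ≤ x ∧ x ≤ (n0 : Int))
      ↔ ((S.length : Int) = (n0 : Int) - 1 ∧ ∀ x ∈ S, 2 ≤ x ∧ x ≤ (n0 : Int)) := by
  have hcard : S.toFinset.card = S.length := List.toFinset_card_of_nodup hS
  have hIcc : (Finset.Icc (2 : Int) (n0 : Int)).card = ((n0 : Int) - 1).toNat := by
    rw [Int.card_Icc]; congr 1; omega
  constructor
  · intro h
    have heq : S.toFinset = Finset.Icc (2 : Int) (n0 : Int) := by
      ext x
      rw [List.mem_toFinset, Finset.mem_Icc]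
      exact h x
    have : S.length = ((n0 : Int) - 1).toNat := by rw [← hcard, heq, hIcc]
    refine ⟨by omega, fun x hx => (h x).mp hx⟩
  · rintro ⟨hlen, hb⟩
    have hsub : S.toFinset ⊆ Finset.Icc (2 : Int) (n0 : Int) := by
      intro x hx
      rw [Finset.mem_Icc]
      exact hb x (List.mem_toFinset.mp hx)
    have heq : S.toFinset = Finset.Icc (2 : Int) (n0 : Int) := by
      apply Finset.eq_of_subset_of_card_le hsub
      rw [hIcc, hcard]; omega
    intro x
    rw [← List.mem_toFinset, heq, Finset.mem_Icc]

-- First-steps: A's symmetric-difference test = B's distinct-count-plus-bounds test.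
lemma pv_first_eq (r : List Int) (n0 : Nat) (hn : 1 ≤ n0) :
    (decide (PySem.Set.symmDiff
        (PySem.Set.discard (PySem.Set.ofList (PySem.List.pyRange 1 ((n0 : Int) + 1))) 1)
        (PySem.Set.ofList r) = []) || (PySem.Set.ofList r).contains 1)
    = (r.contains 1 ||
       (decide ((PySem.Set.len (PySem.Set.ofList r) : Int) = (n0 : Int) - 1) &&
        r.all (fun x => decide (2 ≤ x) && decide (x ≤ (n0 : Int))))) := by
  rw [Bool.or_comm]
  congr 1
  · rw [Bool.eq_iff_iff]
    simp [PySem.Set.contains, List.contains_eq_mem, PySem.Set.mem_ofList]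
  · rw [Bool.eq_iff_iff, decide_eq_true_eq, pv_symmDiff_nil_iff]
    have := pv_nodup_card_iff (PySem.Set.ofList r) (PySem.Set.nodup_ofList r) n0 hn
    constructor
    · intro h
      have h2 := this.mp (fun x => (h x).symm.trans (pv_mem_discard_range _ x))
      simp only [Bool.and_eq_true, decide_eq_true_eq, List.all_eq_true]
      exact ⟨h2.1, fun x hx => by
        have := h2.2 x ((PySem.Set.mem_ofList r x).mpr hx)
        exact ⟨by simpa using this.1, by simpa using this.2⟩⟩
    · intro h
      simp only [Bool.and_eq_true, decide_eq_true_eq, List.all_eq_true] at h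
      have h2 := this.mpr ⟨h.1, fun x hx => by
        have := h.2 x ((PySem.Set.mem_ofList r x).mp hx)
        exact ⟨by simpa using this.1, by simpa using this.2⟩⟩
      intro x
      rw [pv_mem_discard_range]
      exact (h2 x).symm

-- Membership in B's ones-set of a row.
lemma pv_mem_ones (fila : List Int) (j : Int) :
    j ∈ pvOnes fila ↔ ∃ k : Nat, k < fila.length ∧ j = (k : Int) ∧ fila.getD k 0 = 1 := by
  unfold pvOnes
  rw [PySem.Set.mem_ofList _ j, List.mem_map]
  constructor
  · rintro ⟨p, hp, rfl⟩
    rw [List.mem_filter] at hp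
    rcases (PySem.List.mem_enumerate_iff _ _ _).mp hp.1 with ⟨k, hk, rfl⟩
    refine ⟨k, hk, by simp, ?_⟩
    have := hp.2
    simp only [beq_iff_eq] at this
    simp [List.getD_eq_getElem?_getD, List.getElem?_eq_getElem hk, this]
  · rintro ⟨k, hk, rfl, h1⟩
    refine ⟨((k : Int), fila[k]), ?_, by simp⟩
    rw [List.mem_filter]
    constructor
    · exact (PySem.List.mem_enumerate_iff _ _ _).mpr ⟨k, hk, by simp⟩
    · simp only [beq_iff_eq]
      have : fila.getD k 0 = fila[k] := by
        simp [List.getD_eq_getElem?_getD, List.getElem?_eq_getElem hk]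
      rw [← this]; exact h1

-- The B loop from a running candidate set: truthiness of the result.
lemma pv_candLoop_some (rs : List (List Int)) (s : PySem.Set Int) :
    (match pvCandLoop rs (some s) with
      | none => false
      | some c => !c.isEmpty) = true
    ↔ ∃ j ∈ s, ∀ fila ∈ rs, j ∈ pvOnes fila := by
  induction rs generalizing s with
  | nil =>
    simp only [pvCandLoop, List.not_mem_nil]
    constructor
    · intro h
      cases s with
      | nil => simp at h
      | cons a t => exact ⟨a, List.mem_cons_self, by intro fila h; exact absurd h (by simp)⟩
    · rintro ⟨j, hj, -⟩
      cases s with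
      | nil => exact absurd hj (by simp)
      | cons a t => simp
  | cons fila rest ih =>
    have hstep : pvCandLoop (fila :: rest) (some s)
        = if (PySem.Set.inter s (pvOnes fila)).isEmpty
          then some (PySem.Set.inter s (pvOnes fila))
          else pvCandLoop rest (some (PySem.Set.inter s (pvOnes fila))) := rfl
    by_cases he : (PySem.Set.inter s (pvOnes fila)).isEmpty = true
    · rw [hstep, if_pos he]
      have hnil : PySem.Set.inter s (pvOnes fila) = [] := by
        simpa [List.isEmpty_iff] using he
      constructor
      · intro h; rw [hnil] at h; simp at h
      · rintro ⟨j, hj, hall⟩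
        have : j ∈ PySem.Set.inter s (pvOnes fila) :=
          (PySem.Set.mem_inter _ _ _).mpr ⟨hj, hall fila List.mem_cons_self⟩
        rw [hnil] at this
        exact absurd this (by simp)
    · rw [hstep, if_neg he, ih]
      constructor
      · rintro ⟨j, hj, hall⟩
        rcases (PySem.Set.mem_inter _ _ _).mp hj with ⟨hjs, hjo⟩
        refine ⟨j, hjs, fun g hg => ?_⟩
        rcases List.mem_cons.mp hg with rfl | hg'
        · exact hjo
        · exact hall g hg'
      · rintro ⟨j, hj, hall⟩
        exact ⟨j, (PySem.Set.mem_inter _ _ _).mpr ⟨hj, hall fila List.mem_cons_self⟩,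
          fun g hg => hall g (List.mem_cons_of_mem _ hg)⟩

-- Last-steps: A's zip/per-column-set scan = B's candidate-intersection loop.
lemma pv_last_eq (rs : List (List Int)) :
    (pvZipStar rs).any (fun col =>
      decide (PySem.Set.len (PySem.Set.ofList col) = 1) && ((PySem.Set.ofList col).headD 0 == 1))
    = (match pvCandLoop rs none with
        | none => false
        | some c => !c.isEmpty) := by
  cases rs with
  | nil => rfl
  | cons f fs =>
    have hB : (match pvCandLoop (f :: fs) none with
        | none => false
        | some c => !c.isEmpty) = true
        ↔ ∃ j, j ∈ pvOnes f ∧ ∀ g ∈ fs, j ∈ pvOnes g := by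
      have hstep : pvCandLoop (f :: fs) none
          = if (pvOnes f).isEmpty then some (pvOnes f)
            else pvCandLoop fs (some (pvOnes f)) := rfl
      by_cases he : (pvOnes f).isEmpty = true
      · have hnil : pvOnes f = [] := by simpa [List.isEmpty_iff] using he
        rw [hstep, if_pos he]
        constructor
        · intro h; rw [hnil] at h; simp at h
        · rintro ⟨j, hj, -⟩; rw [hnil] at hj; exact absurd hj (by simp)
      · rw [hstep, if_neg he, pv_candLoop_some]
    have hA : (pvZipStar (f :: fs)).any (fun col =>
        decide (PySem.Set.len (PySem.Set.ofList col) = 1) && ((PySem.Set.ofList col).headD 0 == 1)) = true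
        ↔ ∃ j, j ∈ pvOnes f ∧ ∀ g ∈ fs, j ∈ pvOnes g := by
      show (pvZipAux f fs).any _ = true ↔ _
      rw [pv_zip_any]
      simp only [List.any_eq_true, List.mem_range]
      constructor
      · rintro ⟨j, hj, hP⟩
        rw [Bool.and_eq_true] at hP
        rw [pv_col_test, Bool.and_eq_true, List.all_map] at hP
        rcases hP with ⟨hlens, h1, hall⟩
        refine ⟨(j : Int), ?_, ?_⟩
        · exact (pv_mem_ones f (j : Int)).mpr ⟨j, hj, rfl, by simpa using h1⟩
        · intro g hg
          refine (pv_mem_ones g (j : Int)).mpr ⟨j, ?_, rfl, ?_⟩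
          · have := List.all_eq_true.mp hlens g hg
            simpa using this
          · have := List.all_eq_true.mp hall g hg
            simpa using this
      · rintro ⟨j, hjf, hall⟩
        rcases (pv_mem_ones f j).mp hjf with ⟨k, hk, rfl, hk1⟩
        refine ⟨k, hk, ?_⟩
        rw [Bool.and_eq_true, pv_col_test, Bool.and_eq_true, List.all_map]
        have hcomp : ∀ g ∈ fs, k < g.length ∧ g.getD k 0 = 1 := by
          intro g hg
          rcases (pv_mem_ones g (k : Int)).mp (hall g hg) with ⟨k', hk', hkk, hg1⟩
          have : k' = k := by exact_mod_cast hkk.symm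
          subst this
          exact ⟨hk', hg1⟩
        refine ⟨?_, by simpa using hk1, ?_⟩
        · rw [List.all_eq_true]; intro g hg; simpa using (hcomp g hg).1
        · rw [List.all_eq_true]; intro g hg; simpa using (hcomp g hg).2
    rw [Bool.eq_iff_iff, hA, hB]

-- ===== VERDICT (by name: the statement is the Claim_ definition above) =====
theorem puede_hallar_secuencia_spec : Claim_equal_puede_hallar_secuencia := by
  intro t _ hpre
  unfold Pre_puede_hallar_secuencia at hpre
  unfold Spec_puede_hallar_secuencia
  cases t with
  | nil => exact absurd rfl hpre
  | cons r rs =>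
    have hrem : PySem.Set.remove? (PySem.Set.ofList (PySem.List.pyRange 1 (((r :: rs).length : Int) + 1))) 1
        = some (PySem.Set.discard (PySem.Set.ofList (PySem.List.pyRange 1 (((r :: rs).length : Int) + 1))) 1) := by
      simp [PySem.Set.remove?]
    have hget : PySem.List.pyGet? (r :: rs) 0 = some r := by
      simp [PySem.List.pyGet?, PySem.List.pyIdx?]
    have hpop : PySem.List.pop? (r :: rs) 0 = some (r, rs) := by
      simp [PySem.List.pop?, PySem.List.pyIdx?]
    have hslice : PySem.List.slice (r :: rs) (some 1) none = rs := by
      rw [PySem.List.slice_from _ (by norm_num)]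
      simp
    simp only [puede_hallar_secuencia, puede_hallar_secuencia_alt, hrem, hget, hpop, hslice]
    rw [pv_first_eq r (r :: rs).length (by simp), pv_last_eq rs]
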